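-- pv_equiv track=rewrite | github.com/bu119/Algorithm | 프로그래머스/2/389480. 완전범죄/완전범죄.py | solution
-- ===== SOURCE A (Python) =====
-- import heapq
--
-- def solution(info, n, m):
--
--     def bfs():
--         # a, b 누적 값, 몇번 째 훔치는 지
--         heap = [(0, 0, 0)]
--         visited = set()
--         while heap:
--             a, b, idx = heapq.heappop(heap)
--             # 누적 개수가 조건을 초과하면 탐색 중단
--             if a >= n or b >= m:
--                 continue
--             # 이미 방문한 상태라면 탐색 중단
--             if (idx, a, b) in visited:
--                 continue
--             visited.add((idx, a, b))
--             # 마지막 물건을 훔치면 최솟값 반환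
--             if idx == stolen_cnt:
--                 return a
--
--             heapq.heappush(heap, (a+info[idx][0], b, idx+1))
--             heapq.heappush(heap, (a, b+info[idx][1], idx+1))
--
--         return -1
--
--
--     stolen_cnt = len(info)
--     answer = bfs()
--     return answer
-- ===== SOURCE B (Python) =====
-- def solution(info, n, m):
--     # Dict-based DP over the accumulated B-cost: dp[b_total] = minimal A-cost
--     # reaching that B-total with every partial state keeping a < n and b < m.
--     if n <= 0 or m <= 0:
--         return -1
--     dp = {0: 0}
--     for row in info:
--         a, b = row[0], row[1]
--         ndp = {}
--         for bt, at in dp.items():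
--             for nbt, nat in ((bt, at + a), (bt + b, at)):
--                 if nat < n and nbt < m and (nbt not in ndp or ndp[nbt] > nat):
--                     ndp[nbt] = nat
--         dp = ndp
--     return min(dp.values(), default=-1)
-- ===== Notes on version B (the rewrite author's own statement) =====
-- stated objective: alternative
-- what changed: Replaces the best-first heapq search over (a,b,idx) states with visited-set dedup by a per-item dynamic-programming pass keeping a dict from accumulated B-cost to the minimal accumulated A-cost, taking the minimum of the dict values at the end.
-- outside the precondition, e.g. on solution([[-2, -5], [-4, 4], [3, 3]], 3, 3): A returns -3, B returns -4; on solution([[1]], 5, 5): A raises IndexError, B raises IndexError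
import Mathlib
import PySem

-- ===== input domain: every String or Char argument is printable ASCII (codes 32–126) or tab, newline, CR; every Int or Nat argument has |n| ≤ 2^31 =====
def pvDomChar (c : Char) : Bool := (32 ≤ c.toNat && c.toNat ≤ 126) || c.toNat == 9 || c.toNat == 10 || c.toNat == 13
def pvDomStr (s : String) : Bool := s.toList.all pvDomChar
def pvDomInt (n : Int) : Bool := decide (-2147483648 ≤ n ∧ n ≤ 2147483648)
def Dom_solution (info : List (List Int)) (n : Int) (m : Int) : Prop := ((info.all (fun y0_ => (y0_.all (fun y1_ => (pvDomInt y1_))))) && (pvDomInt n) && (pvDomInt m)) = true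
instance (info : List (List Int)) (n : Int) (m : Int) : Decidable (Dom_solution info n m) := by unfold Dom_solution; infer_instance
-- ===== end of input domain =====

-- B replaces A's best-first heap search by a dict DP over the accumulated B-cost (objective: alternative algorithm, same result).

-- ===== PORT A =====
-- Python tuple comparison (a, b, idx) <= (a', b', idx'), lexicographic.
def pvKeyLe (x y : Int × Int × Int) : Bool :=
  decide (x.1 < y.1) || (decide (x.1 = y.1) &&
    (decide (x.2.1 < y.2.1) || (decide (x.2.1 = y.2.1) && decide (x.2.2 ≤ y.2.2))))

-- heapq modeled as a sorted list: heappush = ordered insert, heappop = head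
-- (exact for heapq's pop-the-minimum contract; equal keys are equal states here).
def pvHeapPush : List (Int × Int × Int) → (Int × Int × Int) → List (Int × Int × Int)
  | [], x => [x]
  | h :: t, x => if pvKeyLe x h then x :: h :: t else h :: pvHeapPush t x

theorem mem_pvHeapPush (l : List (Int × Int × Int)) (x s : Int × Int × Int) :
    s ∈ pvHeapPush l x ↔ s ∈ l ∨ s = x := by
  induction l with
  | nil => simp [pvHeapPush]
  | cons h t ih =>
      simp only [pvHeapPush]
      split <;> simp [ih] <;> tauto

-- termination measure for the search loop
def pvW (cnt i : Int) : Nat := 3 ^ ((cnt - i).toNat + 1)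
def pvMeasure (cnt : Int) (heap : List (Int × Int × Int)) : Nat :=
  (heap.map (fun s => pvW cnt s.2.2)).sum

theorem pvMeasure_push (cnt : Int) (l : List (Int × Int × Int)) (x : Int × Int × Int) :
    pvMeasure cnt (pvHeapPush l x) = pvMeasure cnt l + pvW cnt x.2.2 := by
  induction l with
  | nil => simp [pvHeapPush, pvMeasure]
  | cons h t ih =>
      simp only [pvHeapPush]
      split <;> simp [pvMeasure, List.map_cons, List.sum_cons] at * <;> omega

-- the while-heap loop of bfs(); the hypothesis hh only makes the recursion
-- well-founded (idx never exceeds cnt), it does not alter any computed value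
def pvLoop (info : List (List Int)) (n m cnt : Int)
    (heap : List (Int × Int × Int)) (visited : PySem.Set (Int × Int × Int))
    (hh : ∀ s ∈ heap, s.2.2 ≤ cnt) : Int :=
  match heap with
  | [] => -1
  | (a, b, i) :: rest =>
    if n ≤ a ∨ m ≤ b then
      pvLoop info n m cnt rest visited (fun s hs => hh s (List.mem_cons_of_mem _ hs))
    else if PySem.Set.contains visited (i, a, b) then
      pvLoop info n m cnt rest visited (fun s hs => hh s (List.mem_cons_of_mem _ hs))
    else
      if hi : i = cnt then a
      else
        -- info[idx][0] / info[idx][1]; the .getD defaults only make the port total,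
        -- Pre_solution guarantees both lookups succeed
        let row := (PySem.List.pyGet? info i).getD []
        let x := (PySem.List.pyGet? row 0).getD 0
        let y := (PySem.List.pyGet? row 1).getD 0
        pvLoop info n m cnt (pvHeapPush (pvHeapPush rest (a + x, b, i + 1)) (a, b + y, i + 1))
          (PySem.Set.add visited (i, a, b))
          (by
            intro s hs
            have hib : i ≤ cnt := hh (a, b, i) List.mem_cons_self
            rcases (mem_pvHeapPush _ _ _).mp hs with hs' | rfl
            · rcases (mem_pvHeapPush _ _ _).mp hs' with hs'' | rfl
              · exact hh s (List.mem_cons_of_mem _ hs'')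
              · simpa using by omega
            · simpa using by omega)
  termination_by pvMeasure cnt heap
  decreasing_by
  · simp [pvMeasure]
    have : 0 < pvW cnt i := pow_pos (by norm_num) _
    omega
  · simp [pvMeasure]
    have : 0 < pvW cnt i := pow_pos (by norm_num) _
    omega
  · have hib : i ≤ cnt := hh (a, b, i) List.mem_cons_self
    have hlt : i < cnt := lt_of_le_of_ne hib hi
    rw [pvMeasure_push, pvMeasure_push]
    simp only [pvMeasure, List.map_cons, List.sum_cons]
    have h3 : pvW cnt i = 3 * pvW cnt (i + 1) := by
      unfold pvW
      have : (cnt - i).toNat = (cnt - (i + 1)).toNat + 1 := by omega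
      rw [this, pow_succ]
      ring
    have : 0 < pvW cnt (i + 1) := pow_pos (by norm_num) _
    omega

def solution (info : List (List Int)) (n : Int) (m : Int) : Int :=
  pvLoop info n m (info.length : Int) [(0, 0, 0)] PySem.Set.empty
    (by intro s hs; simp only [List.mem_singleton] at hs; subst hs; exact Int.natCast_nonneg _)

-- ===== PORT B =====
def solution_alt (info : List (List Int)) (n : Int) (m : Int) : Int :=
  if n ≤ 0 ∨ m ≤ 0 then -1
  else
    let final := info.foldl (fun dp row =>
      let a := (PySem.List.pyGet? row 0).getD 0   -- row[0]; totality default, see Pre_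
      let b := (PySem.List.pyGet? row 1).getD 0   -- row[1]
      dp.items.foldl (fun ndp p =>
        [(p.1, p.2 + a), (p.1 + b, p.2)].foldl (fun ndp q =>
          if decide (q.2 < n) && decide (q.1 < m) &&
             (match PySem.Dict.get? ndp q.1 with
              | none => true
              | some v => decide (q.2 < v)) then
            PySem.Dict.insert ndp q.1 q.2
          else ndp) ndp) PySem.Dict.empty)
      (PySem.Dict.insert (PySem.Dict.empty) (0 : Int) (0 : Int))
    (PySem.List.min? final.values (fun v => v)).getD (-1)

-- ===== PRECONDITION & SPEC =====
-- When both capacities are positive, Pre_ excludes rows with fewer than two entries,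
-- where A raises IndexError, and restricts to the puzzle's natural domain of
-- nonnegative costs: on negative costs A's heap order and its a>=n / b>=m pruning
-- make its value an artefact of the search order rather than the minimal A-cost,
-- while B computes the true minimum there.
-- With n <= 0 or m <= 0 every input is admitted (A answers -1 before reading info).
def Pre_solution (info : List (List Int)) (n : Int) (m : Int) : Prop :=
  n ≤ 0 ∨ m ≤ 0 ∨ ∀ row ∈ info, 2 ≤ row.length ∧ 0 ≤ row.getD 0 0 ∧ 0 ≤ row.getD 1 0
instance (info : List (List Int)) (n : Int) (m : Int) : Decidable (Pre_solution info n m) := by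
  unfold Pre_solution; infer_instance

def pvWitness_solution : List (List Int) × Int × Int := ([[1, 2], [3, 1]], 3, 3)

def Spec_solution (info : List (List Int)) (n : Int) (m : Int) (out : Int) : Prop := out = solution_alt info n m
instance (info : List (List Int)) (n : Int) (m : Int) (out : Int) : Decidable (Spec_solution info n m out) := by unfold Spec_solution; infer_instance

-- ===== CLAIM (what is proved, stated in full; the proofs are below) =====
def Claim_equal_solution : Prop := ∀ (info : List (List Int)) (n : Int) (m : Int), Dom_solution info n m → Pre_solution info n m → Spec_solution info n m (solution info n m)


-- ===== LEMMAS AND PROOFS =====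

-- items of the instance: (row[0], row[1]) for each row
def pvItems (info : List (List Int)) : List (Int × Int) :=
  info.map (fun row => (row.getD 0 0, row.getD 1 0))

-- the feasible final (a, b) pairs reachable from accumulated (a, b) through the
-- remaining items, every intermediate state (including start and goal) in bounds
def pvGoals (n m : Int) : List (Int × Int) → Int → Int → List (Int × Int)
  | [], a, b => if a < n ∧ b < m then [(a, b)] else []
  | it :: rest, a, b =>
      if a < n ∧ b < m then pvGoals n m rest (a + it.1) b ++ pvGoals n m rest a (b + it.2) else []

def pvReach (info : List (List Int)) (n m a b i : Int) : List (Int × Int) :=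
  pvGoals n m ((pvItems info).drop i.toNat) a b

def pvU (info : List (List Int)) (n m : Int) (heap : List (Int × Int × Int)) : List (Int × Int) :=
  heap.flatMap (fun s => pvReach info n m s.1 s.2.1 s.2.2)

-- the two item costs exactly as the A-port reads them
def pvX (info : List (List Int)) (i : Int) : Int :=
  (PySem.List.pyGet? ((PySem.List.pyGet? info i).getD []) 0).getD 0
def pvY (info : List (List Int)) (i : Int) : Int :=
  (PySem.List.pyGet? ((PySem.List.pyGet? info i).getD []) 1).getD 0

-- invariant on the visited set: only in-bounds non-goal states, and each child is
-- back in the heap, already visited, or out of bounds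
def pvVisInv (info : List (List Int)) (n m : Int)
    (heap : List (Int × Int × Int)) (visited : List (Int × Int × Int)) : Prop :=
  ∀ v ∈ visited, 0 ≤ v.1 ∧ v.1 < (info.length : Int) ∧ v.2.1 < n ∧ v.2.2 < m ∧
    (∀ c ∈ [(v.2.1 + pvX info v.1, v.2.2, v.1 + 1), (v.2.1, v.2.2 + pvY info v.1, v.1 + 1)],
       c.1 < n → c.2.1 < m → (c ∈ heap ∨ (c.2.2, c.1, c.2.1) ∈ visited))

theorem pvKeyLe_fst {x y : Int × Int × Int} (h : pvKeyLe x y = true) : x.1 ≤ y.1 := by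
  simp [pvKeyLe] at h; omega

theorem pvKeyLe_total {x y : Int × Int × Int} (h : ¬ pvKeyLe x y = true) : pvKeyLe y x = true := by
  simp [pvKeyLe] at *; omega

theorem pvKeyLe_trans {x y z : Int × Int × Int}
    (h1 : pvKeyLe x y = true) (h2 : pvKeyLe y z = true) : pvKeyLe x z = true := by
  simp [pvKeyLe] at *; omega

theorem pairwise_pvHeapPush {l : List (Int × Int × Int)} (x : Int × Int × Int)
    (h : l.Pairwise (fun a b => pvKeyLe a b = true)) :
    (pvHeapPush l x).Pairwise (fun a b => pvKeyLe a b = true) := by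
  induction l with
  | nil => simp [pvHeapPush]
  | cons hd t ih =>
      rw [List.pairwise_cons] at h
      simp only [pvHeapPush]
      split
      · rename_i hle
        refine List.Pairwise.cons ?_ (List.Pairwise.cons h.1 h.2)
        intro z hz
        rcases List.mem_cons.mp hz with rfl | hz
        · exact hle
        · exact pvKeyLe_trans hle (h.1 z hz)
      · rename_i hnle
        refine List.Pairwise.cons ?_ (ih h.2)
        intro z hz
        rcases (mem_pvHeapPush _ _ _).mp hz with hz | rfl
        · exact h.1 z hz
        · exact pvKeyLe_total hnle

theorem pvGoals_not_inb {n m : Int} {items : List (Int × Int)} {a b : Int}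
    (h : ¬ (a < n ∧ b < m)) : pvGoals n m items a b = [] := by
  cases items <;> simp [pvGoals, h]

theorem pvGoals_le {n m : Int} :
    ∀ (items : List (Int × Int)), (∀ it ∈ items, 0 ≤ it.1 ∧ 0 ≤ it.2) →
    ∀ (a b : Int), ∀ p ∈ pvGoals n m items a b, a ≤ p.1 ∧ b ≤ p.2 := by
  intro items
  induction items with
  | nil =>
      intro _ a b p hp
      unfold pvGoals at hp
      split at hp <;> simp_all
  | cons it rest ih =>
      intro hnn a b p hp
      have hit := hnn it List.mem_cons_self
      have hrest : ∀ it' ∈ rest, 0 ≤ it'.1 ∧ 0 ≤ it'.2 :=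
        fun it' h' => hnn it' (List.mem_cons_of_mem _ h')
      unfold pvGoals at hp
      split at hp
      · rcases List.mem_append.mp hp with hp | hp
        · have := ih hrest (a + it.1) b p hp
          constructor <;> omega
        · have := ih hrest a (b + it.2) p hp
          constructor <;> omega
      · simp at hp

theorem pvItems_nonneg {info : List (List Int)} (hpre : ∀ row ∈ info, 2 ≤ row.length ∧ 0 ≤ row.getD 0 0 ∧ 0 ≤ row.getD 1 0) :
    ∀ it ∈ pvItems info, 0 ≤ it.1 ∧ 0 ≤ it.2 := by
  intro it hit
  simp only [pvItems, List.mem_map] at hit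
  obtain ⟨row, hrow, rfl⟩ := hit
  exact ⟨(hpre row hrow).2.1, (hpre row hrow).2.2⟩

theorem pvRow0 {row : List Int} (h : 2 ≤ row.length) :
    (PySem.List.pyGet? row 0).getD 0 = row.getD 0 0 := by
  match row, h with
  | a :: b :: t, _ => simp [PySem.List.pyGet?_zero_cons]

theorem pvRow1 {row : List Int} (h : 2 ≤ row.length) :
    (PySem.List.pyGet? row 1).getD 0 = row.getD 1 0 := by
  match row, h with
  | a :: b :: t, _ =>
      rw [show (1 : Int) = ((1 : Nat) : Int) by norm_num, PySem.List.pyGet?_natCast]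
      simp [List.getD]

theorem pvItems_drop {info : List (List Int)} (hpre : ∀ row ∈ info, 2 ≤ row.length ∧ 0 ≤ row.getD 0 0 ∧ 0 ≤ row.getD 1 0)
    {i : Int} (h0 : 0 ≤ i) (hlt : i < (info.length : Int)) :
    (pvItems info).drop i.toNat = (pvX info i, pvY info i) :: (pvItems info).drop (i.toNat + 1) := by
  have hlen : i.toNat < (pvItems info).length := by simp [pvItems]; omega
  rw [List.drop_eq_getElem_cons hlen]
  have hlen' : i.toNat < info.length := by omega
  have hrowmem : info[i.toNat] ∈ info := List.getElem_mem _
  have hrow2 := (hpre _ hrowmem).1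
  have hget : PySem.List.pyGet? info i = some info[i.toNat] :=
    PySem.List.pyGet?_eq_some_getElem info h0 hlt
  congr 1
  simp only [pvItems, List.getElem_map, pvX, pvY, hget, Option.getD_some]
  rw [pvRow0 hrow2, pvRow1 hrow2]



theorem pvU_push {info : List (List Int)} {n m : Int} {l : List (Int × Int × Int)}
    {x : Int × Int × Int} {p : Int × Int} :
    p ∈ pvU info n m (pvHeapPush l x) ↔ p ∈ pvU info n m l ∨ p ∈ pvReach info n m x.1 x.2.1 x.2.2 := by
  simp only [pvU, List.mem_flatMap]
  constructor
  · rintro ⟨s, hs, hp⟩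
    rcases (mem_pvHeapPush _ _ _).mp hs with h | rfl
    · exact Or.inl ⟨s, h, hp⟩
    · exact Or.inr hp
  · rintro (⟨s, hs, hp⟩ | hp)
    · exact ⟨s, (mem_pvHeapPush _ _ _).mpr (Or.inl hs), hp⟩
    · exact ⟨x, (mem_pvHeapPush _ _ _).mpr (Or.inr rfl), hp⟩

theorem pvU_cons {info : List (List Int)} {n m : Int} {s : Int × Int × Int}
    {rest : List (Int × Int × Int)} :
    pvU info n m (s :: rest) = pvReach info n m s.1 s.2.1 s.2.2 ++ pvU info n m rest := by
  simp [pvU]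

theorem pvCovered {info : List (List Int)} {n m : Int} (hpre : ∀ row ∈ info, 2 ≤ row.length ∧ 0 ≤ row.getD 0 0 ∧ 0 ≤ row.getD 1 0)
    {heap visited : List (Int × Int × Int)} (hvis : pvVisInv info n m heap visited) :
    ∀ v ∈ visited, ∀ p ∈ pvReach info n m v.2.1 v.2.2 v.1, p ∈ pvU info n m heap := by
  suffices H : ∀ (k : Nat), ∀ v ∈ visited, ((info.length : Int) - v.1).toNat ≤ k →
      ∀ p ∈ pvReach info n m v.2.1 v.2.2 v.1, p ∈ pvU info n m heap by
    intro v hv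
    exact H _ v hv le_rfl
  intro k
  induction k with
  | zero =>
      intro v hv hk p hp
      obtain ⟨h0, hlen, _, _, _⟩ := hvis v hv
      omega
  | succ k ih =>
      intro v hv hk p hp
      obtain ⟨h0, hlen, ha, hb, hchild⟩ := hvis v hv
      have hcast : (v.1 + 1).toNat = v.1.toNat + 1 := by omega
      unfold pvReach at hp
      rw [pvItems_drop hpre h0 hlen] at hp
      unfold pvGoals at hp
      split at hp
      · rcases List.mem_append.mp hp with hp | hp
        · by_cases hc : v.2.1 + pvX info v.1 < n ∧ v.2.2 < m
          · rcases hchild _ List.mem_cons_self hc.1 hc.2 with hin | hvin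
            · exact List.mem_flatMap.mpr ⟨_, hin, by simpa [pvReach, hcast] using hp⟩
            · exact ih _ hvin (by simp; omega) p (by simpa [pvReach, hcast] using hp)
          · rw [pvGoals_not_inb hc] at hp
            cases hp
        · by_cases hc : v.2.1 < n ∧ v.2.2 + pvY info v.1 < m
          · rcases hchild _ (List.mem_cons_of_mem _ List.mem_cons_self) hc.1 hc.2 with hin | hvin
            · exact List.mem_flatMap.mpr ⟨_, hin, by simpa [pvReach, hcast] using hp⟩
            · exact ih _ hvin (by simp; omega) p (by simpa [pvReach, hcast] using hp)
          · rw [pvGoals_not_inb hc] at hp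
            cases hp
      · cases hp

theorem pvLoop_correct {info : List (List Int)} {n m : Int} (hpre : ∀ row ∈ info, 2 ≤ row.length ∧ 0 ≤ row.getD 0 0 ∧ 0 ≤ row.getD 1 0)
    (heap : List (Int × Int × Int)) (visited : PySem.Set (Int × Int × Int))
    (hh : ∀ s ∈ heap, s.2.2 ≤ (info.length : Int))
    (hpos : ∀ s ∈ heap, 0 ≤ s.2.2)
    (hsort : heap.Pairwise (fun a b => pvKeyLe a b = true))
    (hvis : pvVisInv info n m heap visited) :
    (pvLoop info n m (info.length : Int) heap visited hh = -1 ∧ pvU info n m heap = []) ∨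
    (∃ b', (pvLoop info n m (info.length : Int) heap visited hh, b') ∈ pvU info n m heap ∧
       ∀ p ∈ pvU info n m heap, pvLoop info n m (info.length : Int) heap visited hh ≤ p.1) := by
  revert hpos hsort hvis
  fun_induction pvLoop info n m ((info.length : Int)) heap visited hh
  case case1 =>
    intro _ _ _
    exact Or.inl ⟨rfl, by simp [pvU]⟩
  case case2 visited a b i rest hpr hh' _ ih =>
    intro hpos hsort hvis
    have hre : pvReach info n m a b i = [] := pvGoals_not_inb (by omega)
    have heq : pvU info n m ((a, b, i) :: rest) = pvU info n m rest := by
      rw [pvU_cons]; simp [hre]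
    have hvis' : pvVisInv info n m rest visited := by
      intro v hv
      obtain ⟨h1, h2, h3, h4, hchild⟩ := hvis v hv
      refine ⟨h1, h2, h3, h4, fun c hc hc1 hc2 => ?_⟩
      rcases hchild c hc hc1 hc2 with hin | hvv
      · rcases List.mem_cons.mp hin with rfl | hin
        · exfalso; simp at hc1 hc2; omega
        · exact Or.inl hin
      · exact Or.inr hvv
    rw [heq]
    exact ih (fun s hs => hpos s (List.mem_cons_of_mem _ hs))
      (List.pairwise_cons.mp hsort).2 hvis'
  case case3 visited a b i rest hpr hh' hcon _ ih =>
    intro hpos hsort hvis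
    have hmem : (i, a, b) ∈ visited := List.mem_of_elem_eq_true hcon
    have hvis' : pvVisInv info n m rest visited := by
      intro v hv
      obtain ⟨h1, h2, h3, h4, hchild⟩ := hvis v hv
      refine ⟨h1, h2, h3, h4, fun c hc hc1 hc2 => ?_⟩
      rcases hchild c hc hc1 hc2 with hin | hvv
      · rcases List.mem_cons.mp hin with rfl | hin
        · exact Or.inr hmem
        · exact Or.inl hin
      · exact Or.inr hvv
    have hcov : ∀ p ∈ pvReach info n m a b i, p ∈ pvU info n m rest := by
      intro p hp
      exact pvCovered hpre hvis' (i, a, b) hmem p hp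
    rcases ih (fun s hs => hpos s (List.mem_cons_of_mem _ hs))
        (List.pairwise_cons.mp hsort).2 hvis' with ⟨hres, hU⟩ | ⟨b', hb', hmin⟩
    · refine Or.inl ⟨hres, ?_⟩
      rw [pvU_cons]
      rw [List.append_eq_nil_iff]
      refine ⟨List.eq_nil_iff_forall_not_mem.mpr fun p hp => ?_, hU⟩
      have := hcov p hp
      rw [hU] at this
      exact absurd this (List.not_mem_nil)
    · refine Or.inr ⟨b', ?_, ?_⟩
      · rw [pvU_cons]; exact List.mem_append.mpr (Or.inr hb')
      · intro p hp
        rw [pvU_cons] at hp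
        rcases List.mem_append.mp hp with hp | hp
        · exact hmin p (hcov p hp)
        · exact hmin p hp
  case case4 a b rest hpr hh' hcon _ =>
    intro hpos hsort hvis
    have hinb : a < n ∧ b < m := by omega
    have hdrop : (pvItems info).drop ((info.length : Int)).toNat = [] := by
      apply List.drop_eq_nil_of_le
      simp [pvItems]
    have hre : pvReach info n m a b (info.length : Int) = [(a, b)] := by
      unfold pvReach
      rw [hdrop]
      simp [pvGoals, hinb.1, hinb.2]
    refine Or.inr ⟨b, ?_, ?_⟩
    · rw [pvU_cons]
      exact List.mem_append.mpr (Or.inl (by rw [hre]; exact List.mem_singleton.mpr rfl))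
    · intro p hp
      rw [pvU_cons] at hp
      rcases List.mem_append.mp hp with hp | hp
      · rw [hre] at hp
        rw [List.mem_singleton.mp hp]
      · obtain ⟨z, hz, hpz⟩ := List.mem_flatMap.mp hp
        have hkey : pvKeyLe (a, b, (info.length : Int)) z = true :=
          (List.pairwise_cons.mp hsort).1 z hz
        have h1 : a ≤ z.1 := pvKeyLe_fst hkey
        have hnn : ∀ it ∈ (pvItems info).drop z.2.2.toNat, 0 ≤ it.1 ∧ 0 ≤ it.2 :=
          fun it hit => pvItems_nonneg hpre it (List.mem_of_mem_drop hit)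
        have h2 := (pvGoals_le _ hnn z.1 z.2.1 p hpz).1
        omega
  case case5 visited a b i rest hh' hpr hcon hi row xx yy _ ih =>
    intro hpos hsort hvis
    have h0 : 0 ≤ i := hpos (a, b, i) List.mem_cons_self
    have hle : i ≤ (info.length : Int) := hh' (a, b, i) List.mem_cons_self
    have hlt : i < (info.length : Int) := lt_of_le_of_ne hle hi
    have hinb : a < n ∧ b < m := by omega
    have hx : xx = pvX info i := rfl
    have hy : yy = pvY info i := rfl
    have hcast : (i + 1).toNat = i.toNat + 1 := by omega
    have hstep : ∀ p, p ∈ pvReach info n m a b i ↔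
        (p ∈ pvReach info n m (a + xx) b (i + 1) ∨ p ∈ pvReach info n m a (b + yy) (i + 1)) := by
      intro p
      simp only [pvReach, hcast, hx, hy]
      rw [pvItems_drop hpre h0 hlt]
      simp [pvGoals, hinb.1, hinb.2]
    have hiff : ∀ p, p ∈ pvU info n m (pvHeapPush (pvHeapPush rest (a + xx, b, i + 1)) (a, b + yy, i + 1)) ↔
        p ∈ pvU info n m ((a, b, i) :: rest) := by
      intro p
      rw [pvU_push, pvU_push, pvU_cons, List.mem_append]
      constructor
      · rintro ((hp | hp) | hp)
        · exact Or.inr hp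
        · exact Or.inl ((hstep p).mpr (Or.inl hp))
        · exact Or.inl ((hstep p).mpr (Or.inr hp))
      · rintro (hp | hp)
        · rcases (hstep p).mp hp with hp | hp
          · exact Or.inl (Or.inr hp)
          · exact Or.inr hp
        · exact Or.inl (Or.inl hp)
    have hpos' : ∀ s ∈ pvHeapPush (pvHeapPush rest (a + xx, b, i + 1)) (a, b + yy, i + 1), 0 ≤ s.2.2 := by
      intro s hs
      rcases (mem_pvHeapPush _ _ _).mp hs with hs | rfl
      · rcases (mem_pvHeapPush _ _ _).mp hs with hs | rfl
        · exact hpos s (List.mem_cons_of_mem _ hs)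
        · simpa using by omega
      · simpa using by omega
    have hsort' := pairwise_pvHeapPush (a, b + yy, i + 1) (pairwise_pvHeapPush (l := rest) (a + xx, b, i + 1) (List.pairwise_cons.mp hsort).2)
    have hvis' : pvVisInv info n m
        (pvHeapPush (pvHeapPush rest (a + xx, b, i + 1)) (a, b + yy, i + 1))
        (visited.add (i, a, b)) := by
      intro v hv
      rcases (PySem.Set.mem_add _ _ _).mp hv with hv | rfl
      · obtain ⟨h1, h2, h3, h4, hchild⟩ := hvis v hv
        refine ⟨h1, h2, h3, h4, fun c hc hc1 hc2 => ?_⟩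
        rcases hchild c hc hc1 hc2 with hin | hvv
        · rcases List.mem_cons.mp hin with rfl | hin
          · exact Or.inr ((PySem.Set.mem_add _ _ _).mpr (Or.inr rfl))
          · exact Or.inl ((mem_pvHeapPush _ _ _).mpr (Or.inl ((mem_pvHeapPush _ _ _).mpr (Or.inl hin))))
        · exact Or.inr ((PySem.Set.mem_add _ _ _).mpr (Or.inl hvv))
      · refine ⟨h0, hlt, hinb.1, hinb.2, fun c hc _ _ => ?_⟩
        rcases List.mem_cons.mp hc with rfl | hc
        · exact Or.inl ((mem_pvHeapPush _ _ _).mpr (Or.inl ((mem_pvHeapPush _ _ _).mpr (Or.inr (by rw [hx]))))) 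
        · rcases List.mem_cons.mp hc with rfl | hc
          · exact Or.inl ((mem_pvHeapPush _ _ _).mpr (Or.inr (by rw [hy])))
          · exact absurd hc (List.not_mem_nil)
    rcases ih hpos' hsort' hvis' with ⟨hres, hU⟩ | ⟨b', hb', hmin⟩
    · refine Or.inl ⟨hres, List.eq_nil_iff_forall_not_mem.mpr fun p hp => ?_⟩
      have := (hiff p).mpr hp
      rw [hU] at this
      exact absurd this (List.not_mem_nil)
    · exact Or.inr ⟨b', (hiff _).mp hb', fun p hp => hmin p ((hiff p).mpr hp)⟩

theorem pvA_char {info : List (List Int)} {n m : Int} (hpre : ∀ row ∈ info, 2 ≤ row.length ∧ 0 ≤ row.getD 0 0 ∧ 0 ≤ row.getD 1 0) :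
    (solution info n m = -1 ∧ pvGoals n m (pvItems info) 0 0 = []) ∨
    (∃ b', (solution info n m, b') ∈ pvGoals n m (pvItems info) 0 0 ∧
       ∀ p ∈ pvGoals n m (pvItems info) 0 0, solution info n m ≤ p.1) := by
  have hsing : pvU info n m [(0, 0, 0)] = pvGoals n m (pvItems info) 0 0 := by
    simp [pvU, pvReach]
  have H := pvLoop_correct (n := n) (m := m) hpre [(0, 0, 0)] PySem.Set.empty
      (by intro s hs; simp only [List.mem_singleton] at hs; subst hs; exact Int.natCast_nonneg _)
      (by intro s hs; simp only [List.mem_singleton] at hs; subst hs; norm_num)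
      (by simp)
      (by intro v hv; simp [PySem.Set.empty] at hv)
  rw [hsing] at H
  exact H

-- ===== B-side =====
def pvChild (n m x y : Int) (q : Int × Int) : List (Int × Int) :=
  [(q.1 + x, q.2), (q.1, q.2 + y)].filter (fun c => decide (c.1 < n) && decide (c.2 < m))

def pvStep (n m : Int) (it : Int × Int) (ps : List (Int × Int)) : List (Int × Int) :=
  ps.flatMap (pvChild n m it.1 it.2)

def pvRep (n m : Int) (dp : PySem.Dict Int Int) (ps : List (Int × Int)) : Prop :=
  dp.keys.Nodup ∧
  (∀ b a, dp.get? b = some a → ((a, b) ∈ ps ∧ ∀ c ∈ ps, c.2 = b → a ≤ c.1)) ∧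
  (∀ p ∈ ps, (dp.get? p.2).isSome)

theorem pvFold_goals {n m : Int} (items : List (Int × Int)) :
    ∀ ps, (∀ q ∈ ps, q.1 < n ∧ q.2 < m) → ∀ p,
      (p ∈ items.foldl (fun ps it => pvStep n m it ps) ps ↔
        ∃ q ∈ ps, p ∈ pvGoals n m items q.1 q.2) := by
  induction items with
  | nil =>
      intro ps hps p
      simp only [List.foldl_nil]
      constructor
      · intro hp
        exact ⟨p, hp, by simp [pvGoals, (hps p hp).1, (hps p hp).2]⟩
      · rintro ⟨q, hq, hpq⟩
        simp [pvGoals, (hps q hq).1, (hps q hq).2] at hpq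
        subst hpq
        exact hq
  | cons it rest ih =>
      intro ps hps p
      rw [List.foldl_cons]
      have hps' : ∀ q ∈ pvStep n m it ps, q.1 < n ∧ q.2 < m := by
        intro q hq
        obtain ⟨r, _, hq⟩ := List.mem_flatMap.mp hq
        have := (List.mem_filter.mp hq).2
        simp at this
        exact this
      rw [ih (pvStep n m it ps) hps' p]
      constructor
      · rintro ⟨q', hq', hpq'⟩
        obtain ⟨q, hq, hcq⟩ := List.mem_flatMap.mp hq'
        refine ⟨q, hq, ?_⟩
        have hmem := (List.mem_filter.mp hcq).1
        simp only [pvGoals]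
        rw [if_pos ⟨(hps q hq).1, (hps q hq).2⟩]
        rw [List.mem_append]
        rcases List.mem_cons.mp hmem with rfl | hmem
        · exact Or.inl hpq'
        · rcases List.mem_cons.mp hmem with rfl | hmem
          · exact Or.inr hpq'
          · exact absurd hmem (List.not_mem_nil)
      · rintro ⟨q, hq, hpq⟩
        simp only [pvGoals] at hpq
        rw [if_pos ⟨(hps q hq).1, (hps q hq).2⟩, List.mem_append] at hpq
        rcases hpq with hpq | hpq
        · by_cases hc : (q.1 + it.1) < n ∧ q.2 < m
          · refine ⟨(q.1 + it.1, q.2), ?_, hpq⟩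
            exact List.mem_flatMap.mpr ⟨q, hq, List.mem_filter.mpr ⟨List.mem_cons_self, by simp [hc.1, hc.2]⟩⟩
          · rw [pvGoals_not_inb hc] at hpq
            cases hpq
        · by_cases hc : q.1 < n ∧ (q.2 + it.2) < m
          · refine ⟨(q.1, q.2 + it.2), ?_, hpq⟩
            exact List.mem_flatMap.mpr ⟨q, hq,
              List.mem_filter.mpr ⟨List.mem_cons_of_mem _ List.mem_cons_self, by simp [hc.1, hc.2]⟩⟩
          · rw [pvGoals_not_inb hc] at hpq
            cases hpq

theorem pvCand {n m : Int} {ndp : PySem.Dict Int Int} {S : List (Int × Int)} (q : Int × Int)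
    (h : pvRep n m ndp S) :
    pvRep n m
      (if decide (q.2 < n) && decide (q.1 < m) &&
          (match PySem.Dict.get? ndp q.1 with
           | none => true
           | some v => decide (q.2 < v)) then
         PySem.Dict.insert ndp q.1 q.2
       else ndp)
      (S ++ ([(q.2, q.1)].filter (fun c => decide (c.1 < n) && decide (c.2 < m)))) := by
  obtain ⟨hnd, hmin, hsome⟩ := h
  by_cases hinb : q.2 < n ∧ q.1 < m
  · have hfil : [(q.2, q.1)].filter (fun c => decide (c.1 < n) && decide (c.2 < m)) = [(q.2, q.1)] := by
      simp [List.filter, hinb.1, hinb.2]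
    rw [hfil]
    rcases hget : PySem.Dict.get? ndp q.1 with _ | v
    · have hc : (decide (q.2 < n) && decide (q.1 < m) && true) = true := by
        simp [hinb.1, hinb.2]
      rw [hc, if_pos rfl]
      refine ⟨PySem.Dict.nodup_keys_insert _ _ _ hnd, ?_, ?_⟩
      · intro b a hba
        rw [PySem.Dict.get?_insert] at hba
        by_cases hb : b = q.1
        · rw [if_pos hb] at hba
          injection hba with hba
          subst hba; subst hb
          refine ⟨List.mem_append.mpr (Or.inr List.mem_cons_self), ?_⟩
          intro c hc2 hcb
          rcases List.mem_append.mp hc2 with hc2 | hc2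
          · exfalso
            have := hsome c hc2
            rw [hcb, hget] at this
            simp at this
          · rw [List.mem_singleton.mp hc2]
        · rw [if_neg hb] at hba
          obtain ⟨hm1, hm2⟩ := hmin b a hba
          refine ⟨List.mem_append.mpr (Or.inl hm1), ?_⟩
          intro c hc2 hcb
          rcases List.mem_append.mp hc2 with hc2 | hc2
          · exact hm2 c hc2 hcb
          · exfalso
            rw [List.mem_singleton.mp hc2] at hcb
            simp at hcb
            exact hb hcb.symm
      · intro p hp
        rw [PySem.Dict.get?_insert]
        rcases List.mem_append.mp hp with hp | hp
        · by_cases hb : p.2 = q.1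
          · rw [if_pos hb]; simp
          · rw [if_neg hb]; exact hsome p hp
        · rw [List.mem_singleton.mp hp]
          simp
    · by_cases hlt : q.2 < v
      · have hc : (decide (q.2 < n) && decide (q.1 < m) && decide (q.2 < v)) = true := by
          simp [hinb.1, hinb.2, hlt]
        rw [hc, if_pos rfl]
        refine ⟨PySem.Dict.nodup_keys_insert _ _ _ hnd, ?_, ?_⟩
        · intro b a hba
          rw [PySem.Dict.get?_insert] at hba
          by_cases hb : b = q.1
          · rw [if_pos hb] at hba
            injection hba with hba
            subst hba; subst hb
            refine ⟨List.mem_append.mpr (Or.inr List.mem_cons_self), ?_⟩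
            intro c hc2 hcb
            rcases List.mem_append.mp hc2 with hc2 | hc2
            · have := (hmin _ v hget).2 c hc2 hcb
              omega
            · rw [List.mem_singleton.mp hc2]
          · rw [if_neg hb] at hba
            obtain ⟨hm1, hm2⟩ := hmin b a hba
            refine ⟨List.mem_append.mpr (Or.inl hm1), ?_⟩
            intro c hc2 hcb
            rcases List.mem_append.mp hc2 with hc2 | hc2
            · exact hm2 c hc2 hcb
            · exfalso
              rw [List.mem_singleton.mp hc2] at hcb
              simp at hcb
              exact hb hcb.symm
        · intro p hp
          rw [PySem.Dict.get?_insert]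
          rcases List.mem_append.mp hp with hp | hp
          · by_cases hb : p.2 = q.1
            · rw [if_pos hb]; simp
            · rw [if_neg hb]; exact hsome p hp
          · rw [List.mem_singleton.mp hp]
            simp
      · have hc : (decide (q.2 < n) && decide (q.1 < m) && decide (q.2 < v)) = false := by
          simp [hlt]
        rw [hc, if_neg (by simp)]
        refine ⟨hnd, ?_, ?_⟩
        · intro b a hba
          obtain ⟨hm1, hm2⟩ := hmin b a hba
          refine ⟨List.mem_append.mpr (Or.inl hm1), ?_⟩
          intro c hc2 hcb
          rcases List.mem_append.mp hc2 with hc2 | hc2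
          · exact hm2 c hc2 hcb
          · rw [List.mem_singleton.mp hc2]
            rw [List.mem_singleton.mp hc2] at hcb
            simp only at hcb
            subst hcb
            rw [hget] at hba
            injection hba with hba
            subst hba
            omega
        · intro p hp
          rcases List.mem_append.mp hp with hp | hp
          · exact hsome p hp
          · rw [List.mem_singleton.mp hp]
            simp [hget]
  · have hfil : [(q.2, q.1)].filter (fun c => decide (c.1 < n) && decide (c.2 < m)) = [] := by
      rcases Decidable.not_and_iff_not_or_not.mp hinb with h | h <;> simp [List.filter, h]
    rw [hfil, List.append_nil]
    have hc : (decide (q.2 < n) && decide (q.1 < m) &&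
        (match PySem.Dict.get? ndp q.1 with
         | none => true
         | some v => decide (q.2 < v))) = false := by
      rcases Decidable.not_and_iff_not_or_not.mp hinb with h | h <;> simp [h]
    rw [hc, if_neg (by simp)]
    exact ⟨hnd, hmin, hsome⟩

theorem pvInner {n m x y : Int} (L : List (Int × Int)) :
    ∀ (ndp : PySem.Dict Int Int) (S : List (Int × Int)), pvRep n m ndp S →
    pvRep n m
      (L.foldl (fun ndp p =>
        [(p.1, p.2 + x), (p.1 + y, p.2)].foldl (fun ndp q =>
          if decide (q.2 < n) && decide (q.1 < m) &&
             (match PySem.Dict.get? ndp q.1 with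
              | none => true
              | some v => decide (q.2 < v)) then
            PySem.Dict.insert ndp q.1 q.2
          else ndp) ndp) ndp)
      (S ++ L.flatMap (fun p => pvChild n m x y (p.2, p.1))) := by
  induction L with
  | nil =>
      intro ndp S h
      simpa using h
  | cons p L ih =>
      intro ndp S h
      rw [List.foldl_cons, List.flatMap_cons]
      have hsplit : pvChild n m x y (p.2, p.1) =
          [(p.2 + x, p.1)].filter (fun c => decide (c.1 < n) && decide (c.2 < m)) ++
          [(p.2, p.1 + y)].filter (fun c => decide (c.1 < n) && decide (c.2 < m)) := by
        rw [pvChild, ← List.filter_append]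
        rfl
      have h1 := pvCand (n := n) (m := m) (p.1, p.2 + x) h
      have h2 := pvCand (n := n) (m := m) (p.1 + y, p.2) h1
      have h3 := ih _ _ h2
      rw [hsplit]
      simpa [List.append_assoc] using h3

theorem pvStepRep {n m x y : Int} {dp : PySem.Dict Int Int} {ps : List (Int × Int)}
    (h : pvRep n m dp ps) :
    pvRep n m
      (dp.items.foldl (fun ndp p =>
        [(p.1, p.2 + x), (p.1 + y, p.2)].foldl (fun ndp q =>
          if decide (q.2 < n) && decide (q.1 < m) &&
             (match PySem.Dict.get? ndp q.1 with
              | none => true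
              | some v => decide (q.2 < v)) then
            PySem.Dict.insert ndp q.1 q.2
          else ndp) ndp) PySem.Dict.empty)
      (pvStep n m (x, y) ps) := by
  obtain ⟨hnd0, hmin0, hsome0⟩ := h
  have base : pvRep n m PySem.Dict.empty ([] : List (Int × Int)) := by
    refine ⟨by simp [PySem.Dict.keys, PySem.Dict.empty], ?_, ?_⟩
    · intro b a hba
      rw [PySem.Dict.get?_empty] at hba
      cases hba
    · intro p hp
      cases hp
  have H := pvInner (n := n) (m := m) (x := x) (y := y) dp.items PySem.Dict.empty [] base
  rw [List.nil_append] at H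
  obtain ⟨hnd, hmin, hsome⟩ := H
  -- a representative child in the candidate pool for every child of a ps-state
  have hrepchild : ∀ q ∈ ps, ∀ c ∈ pvChild n m x y q,
      ∃ c' ∈ dp.items.flatMap (fun p => pvChild n m x y (p.2, p.1)), c'.2 = c.2 ∧ c'.1 ≤ c.1 := by
    intro q hq c hc
    have hs := hsome0 q hq
    rcases hq0 : PySem.Dict.get? dp q.2 with _ | a₀
    · rw [hq0] at hs; simp at hs
    · have hps := hmin0 q.2 a₀ hq0
      have ha₀ : a₀ ≤ q.1 := hps.2 q hq rfl
      have hitems : (q.2, a₀) ∈ dp.items := PySem.Dict.mem_items_of_get?_eq_some _ hq0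
      have hcm := List.mem_filter.mp hc
      have hcond := hcm.2
      simp only [Bool.and_eq_true, decide_eq_true_eq] at hcond
      rcases List.mem_cons.mp hcm.1 with rfl | hrest
      · refine ⟨(a₀ + x, q.2), ?_, rfl, by omega⟩
        refine List.mem_flatMap.mpr ⟨(q.2, a₀), hitems, ?_⟩
        refine List.mem_filter.mpr ⟨List.mem_cons_self, ?_⟩
        simp only [Bool.and_eq_true, decide_eq_true_eq]
        constructor
        · omega
        · exact hcond.2
      · rcases List.mem_cons.mp hrest with rfl | hnil
        · refine ⟨(a₀, q.2 + y), ?_, rfl, by omega⟩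
          refine List.mem_flatMap.mpr ⟨(q.2, a₀), hitems, ?_⟩
          refine List.mem_filter.mpr ⟨List.mem_cons_of_mem _ List.mem_cons_self, ?_⟩
          simp only [Bool.and_eq_true, decide_eq_true_eq]
          constructor
          · omega
          · exact hcond.2
        · exact absurd hnil (List.not_mem_nil)
  refine ⟨hnd, ?_, ?_⟩
  · intro b a hba
    obtain ⟨hm1, hm2⟩ := hmin b a hba
    obtain ⟨pq, hpq, hcq⟩ := List.mem_flatMap.mp hm1
    have hgpq : PySem.Dict.get? dp pq.1 = some pq.2 := by
      have : (pq.1, pq.2) ∈ dp.items := by simpa using hpq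
      exact PySem.Dict.get?_of_mem_items _ this hnd0
    have hqs : (pq.2, pq.1) ∈ ps := (hmin0 pq.1 pq.2 hgpq).1
    refine ⟨List.mem_flatMap.mpr ⟨(pq.2, pq.1), hqs, hcq⟩, ?_⟩
    intro c hcs hcb
    obtain ⟨qs, hqsm, hcc⟩ := List.mem_flatMap.mp hcs
    obtain ⟨c', hc', hc'2, hc'1⟩ := hrepchild qs hqsm c hcc
    have := hm2 c' hc' (by rw [hc'2, hcb])
    omega
  · intro p hp
    obtain ⟨qs, hqsm, hcc⟩ := List.mem_flatMap.mp hp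
    obtain ⟨c', hc', hc'2, hc'1⟩ := hrepchild qs hqsm p hcc
    have := hsome c' hc'
    rw [hc'2] at this
    exact this

theorem pvOuter {n m : Int} (info : List (List Int)) :
    ∀ (dp : PySem.Dict Int Int) (ps : List (Int × Int)),
      (∀ row ∈ info, 2 ≤ row.length) → pvRep n m dp ps →
    pvRep n m
      (info.foldl (fun (dp : PySem.Dict Int Int) (row : List Int) =>
        let a := (PySem.List.pyGet? row 0).getD 0
        let b := (PySem.List.pyGet? row 1).getD 0
        dp.items.foldl (fun ndp p =>
          [(p.1, p.2 + a), (p.1 + b, p.2)].foldl (fun ndp q =>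
            if decide (q.2 < n) && decide (q.1 < m) &&
               (match PySem.Dict.get? ndp q.1 with
                | none => true
                | some v => decide (q.2 < v)) then
              PySem.Dict.insert ndp q.1 q.2
            else ndp) ndp) PySem.Dict.empty) dp)
      ((pvItems info).foldl (fun ps it => pvStep n m it ps) ps) := by
  induction info with
  | nil =>
      intro dp ps _ h
      simpa [pvItems] using h
  | cons row rows ih =>
      intro dp ps hrows h
      have h2 : 2 ≤ row.length := hrows row List.mem_cons_self
      rw [show pvItems (row :: rows) = (row.getD 0 0, row.getD 1 0) :: pvItems rows from rfl]
      rw [List.foldl_cons, List.foldl_cons]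
      have hstep := pvStepRep (x := (PySem.List.pyGet? row 0).getD 0)
        (y := (PySem.List.pyGet? row 1).getD 0) h
      simp only [] 
      rw [pvRow0 h2, pvRow1 h2] at hstep ⊢
      exact ih _ _ (fun r hr => hrows r (List.mem_cons_of_mem _ hr)) hstep

theorem pvB_char {info : List (List Int)} {n m : Int} (hpre : ∀ row ∈ info, 2 ≤ row.length ∧ 0 ≤ row.getD 0 0 ∧ 0 ≤ row.getD 1 0)
    (hn : 0 < n) (hm : 0 < m) :
    (solution_alt info n m = -1 ∧ pvGoals n m (pvItems info) 0 0 = []) ∨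
    (∃ b', (solution_alt info n m, b') ∈ pvGoals n m (pvItems info) 0 0 ∧
       ∀ p ∈ pvGoals n m (pvItems info) 0 0, solution_alt info n m ≤ p.1) := by
  have hng : ¬ (n ≤ 0 ∨ m ≤ 0) := by omega
  have hrep0 : pvRep n m (PySem.Dict.insert (PySem.Dict.empty) (0 : Int) (0 : Int)) [((0 : Int), (0 : Int))] := by
    refine ⟨by decide, ?_, ?_⟩
    · intro b a hba
      rw [PySem.Dict.get?_insert] at hba
      by_cases hb : b = 0
      · rw [if_pos hb] at hba
        injection hba with hba
        subst hb; subst hba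
        exact ⟨List.mem_singleton.mpr rfl, by intro c hc _; rw [List.mem_singleton.mp hc]⟩
      · rw [if_neg hb, PySem.Dict.get?_empty] at hba
        cases hba
    · intro p hp
      rw [List.mem_singleton.mp hp]
      simp [PySem.Dict.get?_insert]
  have H := pvOuter (n := n) (m := m) info
      (PySem.Dict.insert (PySem.Dict.empty) (0 : Int) (0 : Int)) [((0 : Int), (0 : Int))]
      (fun r hr => (hpre r hr).1) hrep0
  rw [solution_alt, if_neg hng]
  simp only []
  set F : PySem.Dict Int Int := info.foldl (fun (dp : PySem.Dict Int Int) (row : List Int) =>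
      let a := (PySem.List.pyGet? row 0).getD 0
      let b := (PySem.List.pyGet? row 1).getD 0
      dp.items.foldl (fun ndp p =>
        [(p.1, p.2 + a), (p.1 + b, p.2)].foldl (fun ndp q =>
          if decide (q.2 < n) && decide (q.1 < m) &&
             (match PySem.Dict.get? ndp q.1 with
              | none => true
              | some v => decide (q.2 < v)) then
            PySem.Dict.insert ndp q.1 q.2
          else ndp) ndp) PySem.Dict.empty)
      (PySem.Dict.insert (PySem.Dict.empty) (0 : Int) (0 : Int)) with hF
  obtain ⟨hnd, hmin, hsome⟩ := H
  have hGuard : ∀ q ∈ [((0 : Int), (0 : Int))], q.1 < n ∧ q.2 < m := by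
    intro q hq
    rw [List.mem_singleton.mp hq]
    exact ⟨hn, hm⟩
  have hGoals : ∀ p, p ∈ (pvItems info).foldl (fun ps it => pvStep n m it ps) [((0 : Int), (0 : Int))] ↔
      p ∈ pvGoals n m (pvItems info) 0 0 := by
    intro p
    rw [pvFold_goals (pvItems info) _ hGuard p]
    constructor
    · rintro ⟨q, hq, hpq⟩
      rw [List.mem_singleton.mp hq] at hpq
      exact hpq
    · intro hp
      exact ⟨(0, 0), List.mem_singleton.mpr rfl, hp⟩
  rcases hv : PySem.List.min? F.values (fun v => v) with _ | r
  · rw [Option.getD_none]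
    refine Or.inl ⟨rfl, ?_⟩
    have hvals := (PySem.List.min?_eq_none_iff _ _).mp hv
    rw [List.eq_nil_iff_forall_not_mem]
    intro p hp
    have hpp := (hGoals p).mpr hp
    have hs := hsome p hpp
    rcases hq0 : F.get? p.2 with _ | a'
    · rw [hq0] at hs; simp at hs
    · have hitems := PySem.Dict.mem_items_of_get?_eq_some _ hq0
      have hval : a' ∈ F.values := by
        simp only [PySem.Dict.values]
        exact List.mem_map.mpr ⟨(p.2, a'), hitems, rfl⟩
      rw [hvals] at hval
      exact absurd hval (List.not_mem_nil)
  · rw [Option.getD_some]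
    have hrm := PySem.List.min?_mem hv
    obtain ⟨pr, hpr, hpr2⟩ := List.mem_map.mp (by simpa only [PySem.Dict.values] using hrm)
    have hgr : F.get? pr.1 = some r := by
      have hm2 : (pr.1, r) ∈ F.items := by
        rw [← hpr2]
        simpa using hpr
      exact PySem.Dict.get?_of_mem_items _ hm2 hnd
    refine Or.inr ⟨pr.1, (hGoals _).mp (hmin pr.1 r hgr).1, ?_⟩
    intro p hp
    have hpp := (hGoals p).mpr hp
    have hs := hsome p hpp
    rcases hq0 : F.get? p.2 with _ | a'
    · rw [hq0] at hs; simp at hs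
    · have hle := (hmin p.2 a' hq0).2 p hpp rfl
      have hval : a' ∈ F.values := by
        simp only [PySem.Dict.values]
        exact List.mem_map.mpr ⟨(p.2, a'), PySem.Dict.mem_items_of_get?_eq_some _ hq0, rfl⟩
      have := PySem.List.min?_isMin hv a' hval
      omega

theorem pvA_neg (info : List (List Int)) {n m : Int} (h : n ≤ 0 ∨ m ≤ 0) :
    solution info n m = -1 := by
  rw [solution, pvLoop.eq_def]
  simp only []
  rw [if_pos h, pvLoop.eq_def]

-- ===== VERDICT (by name: the statement is the Claim_ definition above) =====
theorem solution_spec : Claim_equal_solution := by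
  intro info n m _ hpre
  unfold Spec_solution
  by_cases h0 : 0 < n ∧ 0 < m
  · have hpre' : ∀ row ∈ info, 2 ≤ row.length ∧ 0 ≤ row.getD 0 0 ∧ 0 ≤ row.getD 1 0 := by
      rcases hpre with h | h | h
      · omega
      · omega
      · exact h
    rcases pvA_char hpre' with ⟨hA, hGA⟩ | ⟨bA, hAmem, hAmin⟩ <;>
      rcases pvB_char hpre' h0.1 h0.2 with ⟨hB, hGB⟩ | ⟨bB, hBmem, hBmin⟩
    · rw [hA, hB]
    · exfalso; rw [hGA] at hBmem; exact absurd hBmem (List.not_mem_nil)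
    · exfalso; rw [hGB] at hAmem; exact absurd hAmem (List.not_mem_nil)
    · have h1 := hAmin _ hBmem
      have h2 := hBmin _ hAmem
      simp only [] at h1 h2
      omega
  · have hng : n ≤ 0 ∨ m ≤ 0 := by omega
    have hBv : solution_alt info n m = -1 := by rw [solution_alt, if_pos hng]
    rw [hBv, pvA_neg info hng]
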